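-- pv_equiv track=rewrite | github.com/Mattbusel/srfm-lab | research/regime_analysis/regime_persistence.py | compute_sojourn_times
-- ===== SOURCE A (Python) =====
-- from typing import Dict, List, Optional, Tuple
--
-- def compute_sojourn_times(regime_labels: List[str]) -> Dict[str, List[int]]:
--     """
--     Compute run-length durations for each distinct regime label.
--
--     Parameters
--     ----------
--     regime_labels : sequence of string regime labels (one per bar)
--
--     Returns
--     -------
--     dict mapping regime_name -> list of run lengths (in bars)
--
--     Example
--     -------
--     labels = ["A","A","B","B","B","A"]
--     => {"A": [2, 1], "B": [3]}
--     """
--     if len(regime_labels) == 0: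
--         return {}
--
--     durations: Dict[str, List[int]] = {}
--     current = regime_labels[0]
--     count = 1
--
--     for label in regime_labels[1:]:
--         if label == current:
--             count += 1
--         else:
--             durations.setdefault(current, []).append(count)
--             current = label
--             count = 1
--     durations.setdefault(current, []).append(count)
--
--     return durations
-- ===== SOURCE B (Python) =====
-- def compute_sojourn_times(regime_labels):
--     """Two-phase: find run-boundary indices first, then read off durations as index differences."""
--     n = len(regime_labels)
--     if n == 0:
--         return {}
--     bounds = [0] + [i for i in range(1, n) if regime_labels[i] != regime_labels[i - 1]] + [n]
--     durations = {}
--     for s, e in zip(bounds, bounds[1:]):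
--         durations.setdefault(regime_labels[s], []).append(e - s)
--     return durations
-- ===== Notes on version B (the rewrite author's own statement) =====
-- stated objective: alternative
-- what changed: Replaces A's single stateful pass (current label + running counter flushed on change) by a two-phase algorithm: phase 1 collects the boundary indices where the label changes (plus 0 and n), phase 2 reads each duration off as the difference of consecutive boundaries, keyed by the label at the run's start index.
import Mathlib
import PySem

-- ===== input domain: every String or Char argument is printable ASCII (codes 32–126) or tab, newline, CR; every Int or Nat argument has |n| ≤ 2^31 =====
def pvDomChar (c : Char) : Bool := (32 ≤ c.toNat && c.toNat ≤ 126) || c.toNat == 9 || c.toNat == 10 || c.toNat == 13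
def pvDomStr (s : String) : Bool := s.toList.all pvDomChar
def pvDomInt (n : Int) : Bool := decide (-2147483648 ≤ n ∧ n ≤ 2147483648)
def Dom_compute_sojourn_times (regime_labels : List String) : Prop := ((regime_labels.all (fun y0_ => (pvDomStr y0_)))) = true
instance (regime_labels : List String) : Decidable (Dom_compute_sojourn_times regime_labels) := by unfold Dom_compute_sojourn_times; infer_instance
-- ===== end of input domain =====

-- B replaces A's single stateful pass by a two-phase algorithm: collect boundary indices,
-- then read durations off as differences of consecutive boundaries (alternative, same cost).


-- ===== PORT A =====
-- durations.setdefault(k, []).append(v)  (shared by both Pythons)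
def pvAddRun (d : PySem.Dict String (List Int)) (k : String) (v : Int) :
    PySem.Dict String (List Int) :=
  d.modify k [] (fun l => l ++ [v])

-- the body of A's for-loop over the state (durations, current, count)
def pvStepA (st : PySem.Dict String (List Int) × String × Int) (label : String) :
    PySem.Dict String (List Int) × String × Int :=
  if label == st.2.1 then (st.1, st.2.1, st.2.2 + 1)
  else (pvAddRun st.1 st.2.1 st.2.2, label, 1)

def compute_sojourn_times (regime_labels : List String) : List (String × List Int) :=
  match regime_labels with
  | [] => []
  | first :: rest =>
    let st := rest.foldl pvStepA (PySem.Dict.empty, first, 1)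
    (pvAddRun st.1 st.2.1 st.2.2).items

-- ===== PORT B =====
-- phase 1: bounds = [0] + [i for i in range(1, n) if labels[i] != labels[i-1]] + [n]
-- phase 2: for s, e in zip(bounds, bounds[1:]): setdefault(labels[s], []).append(e - s)
-- bounds[1:] is List.drop 1 (exact for a list slice with nonnegative start);
-- all indices hit are in range, so pyGetD with default "" is exact here.
def compute_sojourn_times_alt (regime_labels : List String) : List (String × List Int) :=
  let n : Int := regime_labels.length
  if n == 0 then []
  else
    let bounds : List Int :=
      [0] ++ ((PySem.List.pyRange 1 n 1).filter
        (fun i => !(PySem.List.pyGetD regime_labels i "" == PySem.List.pyGetD regime_labels (i-1) ""))) ++ [n]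
    let durations := (bounds.zip (bounds.drop 1)).foldl
      (fun d p => pvAddRun d (PySem.List.pyGetD regime_labels p.1 "") (p.2 - p.1))
      PySem.Dict.empty
    durations.items

-- ===== PRECONDITION & SPEC =====
def Spec_compute_sojourn_times (regime_labels : List String) (out : List (String × List Int)) : Prop := out = compute_sojourn_times_alt regime_labels
instance (regime_labels : List String) (out : List (String × List Int)) : Decidable (Spec_compute_sojourn_times regime_labels out) := by unfold Spec_compute_sojourn_times; infer_instance

-- ===== CLAIM (what is proved, stated in full; the proofs are below) =====
def Claim_equal_compute_sojourn_times : Prop := ∀ (regime_labels : List String), Dom_compute_sojourn_times regime_labels → Spec_compute_sojourn_times regime_labels (compute_sojourn_times regime_labels)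

-- ===== LEMMAS AND PROOFS =====

-- the run decomposition A computes, as a list of (label, length) pairs
def pvRuns (cur : String) (cnt : Int) : List String → List (String × Int)
  | [] => [(cur, cnt)]
  | l :: t => if l == cur then pvRuns cur (cnt + 1) t else (cur, cnt) :: pvRuns l 1 t

def pvBuild (d : PySem.Dict String (List Int)) (rs : List (String × Int)) :
    PySem.Dict String (List Int) :=
  rs.foldl (fun d p => pvAddRun d p.1 p.2) d

-- A's loop followed by the final setdefault-append builds exactly pvBuild over pvRuns
theorem pvA_runs (t : List String) :
    ∀ (d : PySem.Dict String (List Int)) (cur : String) (cnt : Int),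
    pvAddRun (t.foldl pvStepA (d, cur, cnt)).1 (t.foldl pvStepA (d, cur, cnt)).2.1
        (t.foldl pvStepA (d, cur, cnt)).2.2
      = pvBuild d (pvRuns cur cnt t) := by
  induction t with
  | nil => intro d cur cnt; simp [pvRuns, pvBuild]
  | cons l t ih =>
    intro d cur cnt
    simp only [List.foldl_cons, pvRuns, pvStepA]
    by_cases h : l == cur
    · simp only [h, if_true]
      exact ih d cur (cnt + 1)
    · simp only [h, Bool.false_eq_true, if_false]
      simpa [pvBuild] using ih (pvAddRun d cur cnt) l 1

-- B's phase 1, Nat level: inner boundary indices of a::t, recursively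
def pvInnerRec : String → List String → List Nat
  | _, [] => []
  | a, b :: t => (if b == a then [] else [1]) ++ (pvInnerRec b t).map (· + 1)

def pvAdjPairs (L : List Nat) : List (Nat × Nat) := L.zip (L.drop 1)

theorem pvAdjPairs_cons_cons (x y : Nat) (L : List Nat) :
    pvAdjPairs (x :: y :: L) = (x, y) :: pvAdjPairs (y :: L) := rfl

theorem pvGetD_of_drop (ls : List String) (m : Nat) (b : String) (r : List String)
    (h : ls.drop m = b :: r) : ls.getD m "" = b := by
  have h0 : ls[m]? = some b := by
    have h1 := congrArg (fun l => l[0]?) h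
    simp only [List.getElem?_drop] at h1
    simpa using h1
  simp [List.getD_eq_getElem?_getD, h0]

-- main invariant: the adjacent-boundary pairs of the suffix t, shifted to absolute
-- indices (current run started cnt bars ago, next position is s+cnt), map to pvRuns
theorem pvMain (t : List String) :
    ∀ (ls : List String) (s cnt : Nat) (a : String), 1 ≤ cnt →
    ls.getD s "" = a → ls.drop (s + cnt) = t →
    (pvAdjPairs (s :: ((pvInnerRec a t).map (· + (s + cnt - 1)) ++ [s + cnt + t.length]))).map
      (fun p => (ls.getD p.1 "", ((p.2 : Int) - (p.1 : Int))))
    = pvRuns a (cnt : Int) t := by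
  induction t with
  | nil =>
    intro ls s cnt a hc hget _
    simp only [pvInnerRec, List.map_nil, List.nil_append, List.length_nil, Nat.add_zero]
    simp only [pvAdjPairs, List.drop_succ_cons, List.drop_zero, List.zip_cons_cons,
      List.zip_nil_right, List.map_cons, List.map_nil, pvRuns, hget]
    congr 2
    push_cast; omega
  | cons b t' ih =>
    intro ls s cnt a hc hget hdrop
    by_cases hba : b == a
    · have hba2 : b = a := by simpa using hba
      subst hba2
      simp only [pvInnerRec, beq_self_eq_true, if_true, List.nil_append, List.map_map]
      have hmap : ((fun x => x + (s + cnt - 1)) ∘ (· + 1)) = (· + (s + (cnt + 1) - 1)) := by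
        funext x; simp; omega
      have hlen : s + cnt + (b :: t').length = s + (cnt + 1) + t'.length := by
        simp [List.length_cons]; omega
      rw [hmap, hlen]
      have hdrop' : ls.drop (s + (cnt + 1)) = t' := by
        have := congrArg (List.drop 1) hdrop
        rw [← List.drop_drop] at this
        simpa [Nat.add_comm 1 (s + cnt), Nat.add_assoc] using this
      rw [ih ls s (cnt + 1) b (by omega) hget hdrop']
      simp only [pvRuns, beq_self_eq_true, if_true, Nat.cast_add, Nat.cast_one]
    · have hba' : (b == a) = false := by simpa using hba
      simp only [pvInnerRec, hba', Bool.false_eq_true, if_false, List.map_cons,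
        List.map_append, List.map_map, List.cons_append]
      have h1 : 1 + (s + cnt - 1) = s + cnt := by omega
      have hmap : ((fun x => x + (s + cnt - 1)) ∘ (· + 1)) = (· + (s + cnt + 1 - 1)) := by
        funext x; simp; omega
      have hlen : s + cnt + (b :: t').length = s + cnt + 1 + t'.length := by
        simp [List.length_cons]; omega
      rw [h1, hmap, hlen, pvAdjPairs_cons_cons]
      simp only [List.map_cons, List.map_nil, List.nil_append]
      have hgetb : ls.getD (s + cnt) "" = b := pvGetD_of_drop ls (s + cnt) b t' hdrop
      have hdrop' : ls.drop (s + cnt + 1) = t' := by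
        have := congrArg (List.drop 1) hdrop
        rw [← List.drop_drop] at this
        simpa [Nat.add_comm 1 (s + cnt)] using this
      rw [ih ls (s + cnt) 1 b (by omega) hgetb hdrop']
      simp only [pvRuns, hba', Bool.false_eq_true, if_false, hget]
      congr 2
      push_cast; omega

-- phase 1's filter over range(1, n) computes exactly the recursive boundary list
theorem pvInnerRec_filter (t : List String) : ∀ (a : String),
    pvInnerRec a t
      = ((List.range t.length).filter
          (fun k => !((a :: t).getD (k+1) "" == (a :: t).getD k ""))).map (· + 1) := by
  induction t with
  | nil => intro a; rfl
  | cons b t' ih =>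
    intro a
    rw [List.length_cons, List.range_succ_eq_map, List.filter_cons, List.filter_map]
    have hp : ((fun k => !((a :: b :: t').getD (k+1) "" == (a :: b :: t').getD k "")) ∘ Nat.succ)
        = (fun k => !((b :: t').getD (k+1) "" == (b :: t').getD k "")) := by
      funext k
      simp
    rw [hp, ← ih b]
    by_cases hba : (b == a) = true
    · have : (!((a :: b :: t').getD (0+1) "" == (a :: b :: t').getD 0 "")) = false := by
        simp [List.getD, hba]
      rw [this]
      simp [pvInnerRec, hba]
    · have hba' : (b == a) = false := by simpa using hba
      have : (!((a :: b :: t').getD (0+1) "" == (a :: b :: t').getD 0 "")) = true := by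
        simp [List.getD, hba']
      rw [this]
      simp [pvInnerRec, hba']

-- bound indices of the Int-level port are the casts of the Nat-level boundaries
theorem pvBounds_cast (a : String) (t : List String) :
    ([0] ++ ((PySem.List.pyRange 1 ((a :: t).length : Int) 1).filter
        (fun i => !(PySem.List.pyGetD (a :: t) i "" == PySem.List.pyGetD (a :: t) (i-1) ""))) ++
      [((a :: t).length : Int)])
    = ((0 :: ((pvInnerRec a t).map (· + 0) ++ [1 + t.length])).map (fun k : Nat => (k : Int))) := by
  rw [PySem.List.pyRange_one]
  have he : ((((a :: t).length : Nat) : Int) - 1).toNat = t.length := by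
    simp [List.length_cons]
  rw [he, List.filter_map]
  have hp : ((fun i => !(PySem.List.pyGetD (a :: t) i "" == PySem.List.pyGetD (a :: t) (i-1) ""))
        ∘ (fun k : Nat => (1 : Int) + k))
      = (fun k => !((a :: t).getD (k+1) "" == (a :: t).getD k "")) := by
    funext k
    have h1 : (1 : Int) + k = ((k + 1 : Nat) : Int) := by push_cast; ring
    have h2 : ((k + 1 : Nat) : Int) - 1 = ((k : Nat) : Int) := by push_cast; ring
    rw [Function.comp_apply, h1, h2, PySem.List.pyGetD_natCast, PySem.List.pyGetD_natCast]
  rw [hp]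
  have hfuse : List.map (fun k : Nat => (1 : Int) + k)
        ((List.range t.length).filter
          (fun k => !((a :: t).getD (k+1) "" == (a :: t).getD k "")))
      = List.map (fun k : Nat => (k : Int))
        (((List.range t.length).filter
          (fun k => !((a :: t).getD (k+1) "" == (a :: t).getD k ""))).map (· + 1)) := by
    rw [List.map_map]
    apply List.map_congr_left
    intro x _
    simp only [Function.comp_apply]
    push_cast; ring
  rw [hfuse, ← pvInnerRec_filter t a]
  have hid : (pvInnerRec a t).map (· + 0) = pvInnerRec a t := by simp
  rw [hid]
  simp [List.length_cons, Nat.add_comm]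

-- ===== VERDICT (by name: the statement is the Claim_ definition above) =====
theorem compute_sojourn_times_spec : Claim_equal_compute_sojourn_times := by
  intro ls _
  unfold Spec_compute_sojourn_times
  cases ls with
  | nil => rfl
  | cons a t =>
    unfold compute_sojourn_times compute_sojourn_times_alt
    have hn : ((((a :: t).length : Nat) : Int) == 0) = false := by
      rw [beq_eq_false_iff_ne]
      simp only [List.length_cons, Nat.cast_add, Nat.cast_one]
      omega
    simp only [hn, Bool.false_eq_true, if_false]
    rw [pvA_runs t PySem.Dict.empty a 1, pvBounds_cast a t]
    rw [← List.map_drop, List.zip_map, List.foldl_map]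
    congr 1
    have hmain := pvMain t (a :: t) 0 1 a (by omega) (by simp [List.getD]) (by simp)
    norm_num at hmain
    simp only [show (fun x : Nat => x + 0) = id from funext fun _ => rfl, List.map_id]
    rw [show (0 :: (pvInnerRec a t ++ [1 + t.length])).zip
          (List.drop 1 (0 :: (pvInnerRec a t ++ [1 + t.length])))
        = pvAdjPairs (0 :: (pvInnerRec a t ++ [1 + t.length])) from rfl]
    rw [← hmain]
    unfold pvBuild
    rw [List.foldl_map]
    congr 1
    funext d p
    simp [Prod.map, List.getD_eq_getElem?_getD]
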